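-- pv_equiv track=rewrite | github.com/VenkataSriSaiSuryaMandava/LeetCode-Solutions | 3908-valid-digit-number/3908-valid-digit-number.py | validDigit
-- ===== SOURCE A (Python) =====
-- def validDigit(n, x):
--     """
--     :type n: int
--     :type x: int
--     :rtype: bool
--     """
--     contains = False
--     original = n
--
--     while n:
--         if n % 10 == x:
--             contains = True
--         n = n // 10
--
--     while original >= 10:
--         original = original // 10
--
--     firstDigit = original
--
--     return contains and firstDigit != x
-- ===== SOURCE B (Python) =====
-- def validDigit(n, x):
--     s = str(n)
--     d = str(x)
--     return len(d) == 1 and d in s and d != s[:1]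
-- ===== Notes on version B (the rewrite author's own statement) =====
-- stated objective: simpler
-- what changed: Replaces both arithmetic digit-extraction loops with a single decimal-string representation: containment becomes a substring test str(x) in str(n) (guarded by len(str(x))==1 so multi-digit or negative x can never match, just as n%10==x never fires for such x) and the leading-digit check becomes a comparison with the first character.
-- outside the precondition, e.g. on validDigit(-5, 5): A does not finish within the time limit, B returns True
import Mathlib
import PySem

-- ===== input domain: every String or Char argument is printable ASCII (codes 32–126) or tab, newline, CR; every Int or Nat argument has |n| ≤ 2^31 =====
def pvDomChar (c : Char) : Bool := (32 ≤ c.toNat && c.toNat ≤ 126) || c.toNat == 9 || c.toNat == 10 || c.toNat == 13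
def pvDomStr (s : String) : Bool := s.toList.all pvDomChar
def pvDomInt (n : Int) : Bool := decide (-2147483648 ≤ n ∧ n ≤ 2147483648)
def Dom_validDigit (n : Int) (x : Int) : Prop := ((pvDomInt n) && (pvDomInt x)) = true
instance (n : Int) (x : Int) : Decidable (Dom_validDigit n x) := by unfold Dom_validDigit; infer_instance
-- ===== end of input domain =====

-- B replaces A's two arithmetic digit-extraction loops by one decimal-string view:
-- a guarded substring test and a first-character comparison (objective: simpler).

-- ===== PORT A =====
-- first loop: 'while n: if n % 10 == x: contains = True; n = n // 10'
-- (for n < 0 the Python loop never terminates — n // 10 stays -1 — so the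
--  'else' arm also catches negative n, unreachable under Pre_, to totalize it)
def aContains (n x : Int) (c : Bool) : Bool :=
  if _h : 0 < n then
    aContains (PySem.Int.floordiv n 10) x (c || (PySem.Int.mod n 10 == x))
  else c
termination_by n.toNat
decreasing_by
  have h1 : PySem.Int.floordiv n 10 < n := by
    rw [PySem.Int.floordiv_lt_iff_lt_mul (by norm_num)]; nlinarith
  omega

-- second loop: 'while original >= 10: original = original // 10'
def aFirst (n : Int) : Int :=
  if _h : 10 ≤ n then aFirst (PySem.Int.floordiv n 10) else n
termination_by n.toNat
decreasing_by
  have h1 : PySem.Int.floordiv n 10 < n := by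
    rw [PySem.Int.floordiv_lt_iff_lt_mul (by norm_num)]; nlinarith
  omega

-- 'return contains and firstDigit != x'
def validDigit (n : Int) (x : Int) : Bool :=
  aContains n x false && !(aFirst n == x)

-- ===== PORT B =====
-- Source B: s = str(n); d = str(x); return len(d) == 1 and d in s and d != s[:1]
def validDigit_alt (n : Int) (x : Int) : Bool :=
  let s := PySem.Int.toChars n
  let d := PySem.Int.toChars x
  (PySem.List.len d == 1) && PySem.Chars.isIn d s && !(d == PySem.List.slice s none (some 1))

-- ===== PRECONDITION & SPEC =====
-- Pre_ excludes n < 0, on which A's first loop never returns (n // 10 stays -1 forever in Python).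
def Pre_validDigit (n : Int) (x : Int) : Prop := 0 ≤ n
instance (n : Int) (x : Int) : Decidable (Pre_validDigit n x) := by unfold Pre_validDigit; infer_instance
def pvWitness_validDigit : Int × Int := (57, 5)

def Spec_validDigit (n : Int) (x : Int) (out : Bool) : Prop := out = validDigit_alt n x
instance (n : Int) (x : Int) (out : Bool) : Decidable (Spec_validDigit n x out) := by unfold Spec_validDigit; infer_instance

-- ===== CLAIM (what is proved, stated in full; the proofs are below) =====
def Claim_equal_validDigit : Prop := ∀ (n : Int) (x : Int), Dom_validDigit n x → Pre_validDigit n x → Spec_validDigit n x (validDigit n x)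

-- ===== LEMMAS AND PROOFS =====

-- Nat-level mirrors of A's two loops (proof helpers only)
def natContains (m : Nat) (x : Int) : Bool :=
  if m = 0 then false
  else (((m % 10 : Nat) : Int) == x) || natContains (m / 10) x
decreasing_by exact Nat.div_lt_self (Nat.pos_of_ne_zero (by assumption)) (by norm_num)

def natFirst (m : Nat) : Nat :=
  if m < 10 then m else natFirst (m / 10)
decreasing_by exact Nat.div_lt_self (by omega) (by norm_num)

lemma floordiv_nonneg_eq (n : Int) (h : 0 ≤ n) :
    PySem.Int.floordiv n 10 = ((n.toNat / 10 : Nat) : Int) := by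
  simp [PySem.Int.floordiv, Int.fdiv_eq_ediv]; omega

lemma mod_nonneg_eq (n : Int) (h : 0 ≤ n) :
    PySem.Int.mod n 10 = ((n.toNat % 10 : Nat) : Int) := by
  simp [PySem.Int.mod, Int.fmod_eq_emod]; omega

lemma aContains_nat (m : Nat) : ∀ (x : Int) (c : Bool),
    aContains (m : Int) x c = (c || natContains m x) := by
  induction m using Nat.strong_induction_on with
  | _ m IH =>
    intro x c
    rw [aContains, natContains]
    by_cases hm : m = 0
    · subst hm; simp
    · have hpos : (0:Int) < (m:Int) := by exact_mod_cast Nat.pos_of_ne_zero hm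
      rw [dif_pos hpos, if_neg hm]
      rw [floordiv_nonneg_eq _ (by positivity), mod_nonneg_eq _ (by positivity)]
      simp only [Int.toNat_natCast]
      rw [IH (m / 10) (Nat.div_lt_self (Nat.pos_of_ne_zero hm) (by norm_num))]
      rw [Bool.or_assoc]

lemma aFirst_nat (m : Nat) : aFirst (m : Int) = ((natFirst m : Nat) : Int) := by
  induction m using Nat.strong_induction_on with
  | _ m IH =>
    rw [aFirst, natFirst]
    by_cases hm : m < 10
    · rw [dif_neg (by exact_mod_cast by omega : ¬ (10:Int) ≤ (m:Int)), if_pos hm]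
    · rw [dif_pos (by exact_mod_cast by omega : (10:Int) ≤ (m:Int)), if_neg hm]
      rw [floordiv_nonneg_eq _ (by positivity)]
      simp only [Int.toNat_natCast]
      exact IH (m / 10) (Nat.div_lt_self (by omega) (by norm_num))

lemma tdc_acc (fuel : Nat) : ∀ (n : Nat) (ds : List Char),
    Nat.toDigitsCore 10 fuel n ds = Nat.toDigitsCore 10 fuel n [] ++ ds := by
  induction fuel with
  | zero => intro n ds; simp [Nat.toDigitsCore]
  | succ f IH =>
    intro n ds
    simp only [Nat.toDigitsCore]
    by_cases h : n / 10 = 0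
    · simp [h]
    · simp only [if_neg h]
      rw [IH (n / 10) (Nat.digitChar (n % 10) :: ds), IH (n / 10) [Nat.digitChar (n % 10)]]
      simp

lemma tdc_fuel (fuel : Nat) : ∀ (fuel' n : Nat), n < fuel → n < fuel' →
    Nat.toDigitsCore 10 fuel n [] = Nat.toDigitsCore 10 fuel' n [] := by
  induction fuel with
  | zero => omega
  | succ f IH =>
    intro fuel' n h h'
    cases fuel' with
    | zero => omega
    | succ f' =>
      simp only [Nat.toDigitsCore]
      by_cases hd : n / 10 = 0
      · simp [hd]
      · simp only [if_neg hd]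
        have hlt : n / 10 < n := Nat.div_lt_self (by omega) (by norm_num)
        rw [tdc_acc f (n / 10), tdc_acc f' (n / 10),
          IH f' (n / 10) (by omega) (by omega)]

lemma toDigits_lt (m : Nat) (h : m < 10) : Nat.toDigits 10 m = [Nat.digitChar m] := by
  simp [Nat.toDigits, Nat.toDigitsCore, Nat.div_eq_of_lt h, Nat.mod_eq_of_lt h]

lemma toDigits_rec (m : Nat) (h : 10 ≤ m) :
    Nat.toDigits 10 m = Nat.toDigits 10 (m / 10) ++ [Nat.digitChar (m % 10)] := by
  have hd : m / 10 ≠ 0 := by omega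
  have h1 : Nat.toDigits 10 m = Nat.toDigitsCore 10 m (m / 10) [Nat.digitChar (m % 10)] := by
    rw [Nat.toDigits, Nat.toDigitsCore, if_neg hd]
  rw [h1, tdc_acc m (m / 10), tdc_fuel m (m / 10 + 1) (m / 10) (by omega) (by omega)]
  rfl

lemma toDigits_ne_nil (m : Nat) : Nat.toDigits 10 m ≠ [] := by
  by_cases h : m < 10
  · rw [toDigits_lt m h]; simp
  · rw [toDigits_rec m (by omega)]; simp

lemma toChars_nonneg (n : Int) (h : 0 ≤ n) : PySem.Int.toChars n = Nat.toDigits 10 n.toNat := by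
  have hneg : ¬ n < 0 := by omega
  simp [PySem.Int.toChars, hneg]

lemma digitChar_inj (a b : Nat) (ha : a < 10) (hb : b < 10) :
    Nat.digitChar a = Nat.digitChar b ↔ a = b := by
  interval_cases a <;> interval_cases b <;> decide

lemma natFirst_lt (m : Nat) : natFirst m < 10 := by
  induction m using Nat.strong_induction_on with
  | _ m IH =>
    rw [natFirst]
    by_cases h : m < 10
    · simpa [h]
    · rw [if_neg h]; exact IH (m / 10) (Nat.div_lt_self (by omega) (by norm_num))

lemma take_one_toDigits (m : Nat) :
    (Nat.toDigits 10 m).take 1 = [Nat.digitChar (natFirst m)] := by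
  induction m using Nat.strong_induction_on with
  | _ m IH =>
    rw [natFirst]
    by_cases h : m < 10
    · rw [toDigits_lt m h, if_pos h]; rfl
    · rw [toDigits_rec m (by omega), if_neg h,
        List.take_append_of_le_length (by
          have := List.length_pos_of_ne_nil (toDigits_ne_nil (m / 10))
          omega)]
      exact IH (m / 10) (Nat.div_lt_self (by omega) (by norm_num))

lemma natContains_notdigit (m : Nat) (x : Int) (hx : x < 0 ∨ 9 < x) :
    natContains m x = false := by
  induction m using Nat.strong_induction_on with
  | _ m IH =>
    rw [natContains]
    by_cases h : m = 0
    · simp [h]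
    · rw [if_neg h, IH (m / 10) (Nat.div_lt_self (Nat.pos_of_ne_zero h) (by norm_num))]
      have h10 : m % 10 < 10 := Nat.mod_lt m (by norm_num)
      simp
      omega

lemma mem_toDigits (m : Nat) (x : Int) (hx0 : 0 ≤ x) (hx9 : x ≤ 9) : 1 ≤ m →
    ((Nat.digitChar x.toNat ∈ Nat.toDigits 10 m) ↔ natContains m x = true) := by
  induction m using Nat.strong_induction_on with
  | _ m IH =>
    intro hm
    rw [natContains, if_neg (by omega)]
    by_cases h : m < 10
    · rw [toDigits_lt m h]
      have hd0 : m / 10 = 0 := by omega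
      rw [hd0]
      have hx10 : x.toNat < 10 := by omega
      simp [natContains, digitChar_inj _ _ hx10 h]
      omega
    · rw [toDigits_rec m (by omega)]
      have hlt : m / 10 < m := Nat.div_lt_self (by omega) (by norm_num)
      have h10 : m % 10 < 10 := Nat.mod_lt m (by norm_num)
      have hx10 : x.toNat < 10 := by omega
      simp [IH (m / 10) hlt (by omega), digitChar_inj _ _ hx10 h10]
      cases hb : natContains (m / 10) x <;> simp <;> omega

lemma isIn_singleton (c : Char) (s : List Char) :
    PySem.Chars.isIn [c] s = true ↔ c ∈ s := by
  rw [PySem.Chars.isIn_iff_infix]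
  exact ⟨fun h => h.mem (by simp), fun h => by
    obtain ⟨l1, l2, rfl⟩ := List.append_of_mem h
    exact ⟨l1, l2, by simp⟩⟩

lemma len_toChars_eq_one_iff (x : Int) :
    (PySem.Int.toChars x).length = 1 ↔ 0 ≤ x ∧ x ≤ 9 := by
  by_cases hneg : x < 0
  · rw [PySem.Int.toChars, if_pos hneg]
    have := List.length_pos_of_ne_nil (toDigits_ne_nil x.natAbs)
    simp only [List.length_cons]
    omega
  · rw [toChars_nonneg x (by omega)]
    by_cases h : x.toNat < 10
    · rw [toDigits_lt _ h]; simp; omega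
    · rw [toDigits_rec _ (by omega)]
      have := List.length_pos_of_ne_nil (toDigits_ne_nil (x.toNat / 10))
      simp only [List.length_append, List.length_cons, List.length_nil]
      omega

lemma toChars_digit (x : Int) (h0 : 0 ≤ x) (h9 : x ≤ 9) :
    PySem.Int.toChars x = [Nat.digitChar x.toNat] := by
  rw [toChars_nonneg x h0, toDigits_lt _ (by omega)]

-- ===== VERDICT (by name: the statement is the Claim_ definition above) =====
theorem validDigit_spec : Claim_equal_validDigit := by
  intro n x _ hpre
  unfold Spec_validDigit validDigit validDigit_alt
  have hpre' : (0:Int) ≤ n := hpre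
  have hn : ((n.toNat : Nat) : Int) = n := Int.toNat_of_nonneg hpre'
  rw [← hn]
  set m := n.toNat with hm
  rw [aContains_nat, aFirst_nat, toChars_nonneg _ (by positivity)]
  simp only [Int.toNat_natCast, Bool.false_or]
  by_cases hx : 0 ≤ x ∧ x ≤ 9
  · obtain ⟨hx0, hx9⟩ := hx
    rw [toChars_digit x hx0 hx9]
    have hslice : PySem.List.slice (Nat.toDigits 10 m) none (some 1)
        = (Nat.toDigits 10 m).take 1 := by
      simpa using PySem.List.slice_to_natCast (Nat.toDigits 10 m) (b := 1)
    rw [hslice, take_one_toDigits]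
    by_cases hm0 : m = 0
    · rw [hm0]
      have h0 : natContains 0 x = false := by rw [natContains]; simp
      have hf0 : natFirst 0 = 0 := by rw [natFirst]; norm_num
      rw [h0, hf0, toDigits_lt 0 (by norm_num)]
      by_cases hq : x.toNat = 0
      · have hx0' : x = 0 := by omega
        subst hx0'
        decide
      · have hne : Nat.digitChar x.toNat ≠ Nat.digitChar 0 :=
          fun hc => hq ((digitChar_inj _ _ (by omega) (by norm_num)).mp hc)
        have hin : PySem.Chars.isIn [Nat.digitChar x.toNat] [Nat.digitChar 0] = false := by
          rw [← Bool.not_eq_true, isIn_singleton]; simp [hne]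
        simp [hin]
    · have hmem := mem_toDigits m x hx0 hx9 (by omega)
      have hdc : (Nat.digitChar x.toNat = Nat.digitChar (natFirst m)) ↔ x.toNat = natFirst m :=
        digitChar_inj _ _ (by omega) (natFirst_lt m)
      have hIn : PySem.Chars.isIn [Nat.digitChar x.toNat] (Nat.toDigits 10 m) = natContains m x := by
        rw [Bool.eq_iff_iff, isIn_singleton]; exact hmem
      rw [hIn]
      have hlast : (((natFirst m : Nat) : Int) == x)
          = ([Nat.digitChar x.toNat] == [Nat.digitChar (natFirst m)]) := by
        by_cases hq : x.toNat = natFirst m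
        · have hq' : ((natFirst m : Nat) : Int) = x := by omega
          simp [hq', hdc.mpr hq]
        · have hq' : ¬ ((natFirst m : Nat) : Int) = x := by omega
          have hne : Nat.digitChar x.toNat ≠ Nat.digitChar (natFirst m) := fun hc => hq (hdc.mp hc)
          simp [hq', hne]
      rw [hlast]
      simp [PySem.List.len]
  · have hA : natContains m x = false := natContains_notdigit m x (by omega)
    have hlen : ¬ ((PySem.Int.toChars x).length = 1) := by
      rw [len_toChars_eq_one_iff]; tauto
    simp [hA, PySem.List.len_eq, hlen]
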